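-- pv_equiv track=rewrite | github.com/Adarsh-Roy/CP | codeforces/practice/B. Coloring Rectangles.py | f
-- ===== SOURCE A (Python) =====
-- def f(n, m) -> int:
--     if n <= 3 and m <= 3:
--         return min(n, m)
--     if n > m:
--         n_left = n % 3
--         return f(n_left, m) + m * (n // 3)
--     else:
--         m_left = m % 3
--         return f(n, m_left) + n * (m // 3)
-- ===== SOURCE B (Python) =====
-- def f(n, m) -> int:
--     # Closed form: ceiling of n*m/3 via floor division; no recursion.
--     return (n * m + 2) // 3
-- ===== Notes on version B (the rewrite author's own statement) =====
-- stated objective: simpler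
-- what changed: Replaces A's peel-off-strips-of-3 recursion with the single closed-form expression (n*m+2)//3 (ceiling of n*m/3).
-- outside the precondition, e.g. on f(-1, -1): A returns -1, B returns 1; on f(5, -1): A returns -2, B returns -1
import Mathlib
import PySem

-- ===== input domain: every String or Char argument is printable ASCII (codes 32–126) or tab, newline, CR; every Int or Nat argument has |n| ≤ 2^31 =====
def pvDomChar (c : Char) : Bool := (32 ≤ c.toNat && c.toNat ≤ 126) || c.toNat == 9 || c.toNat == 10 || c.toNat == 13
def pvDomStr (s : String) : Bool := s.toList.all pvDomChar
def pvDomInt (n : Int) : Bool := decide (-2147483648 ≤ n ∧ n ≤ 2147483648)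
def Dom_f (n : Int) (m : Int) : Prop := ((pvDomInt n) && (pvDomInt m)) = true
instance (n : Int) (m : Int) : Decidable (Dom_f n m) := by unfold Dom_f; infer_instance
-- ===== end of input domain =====

-- B replaces A's recursion by the closed form (n*m+2)//3; objective: simpler.

-- ===== PORT A =====
-- A's recursion, transliterated; `fuel` only totalizes it (fuel = |n| + |m| always
-- suffices, since each recursive call strictly shrinks that measure).
def fRec (fuel : Nat) (n : Int) (m : Int) : Int :=
  if n ≤ 3 ∧ m ≤ 3 then min n m
  else
    match fuel with
    | 0 => 0  -- unreachable for fuel = |n| + |m|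
    | fuel + 1 =>
      if n > m then
        fRec fuel (PySem.Int.mod n 3) m + m * PySem.Int.floordiv n 3
      else
        fRec fuel n (PySem.Int.mod m 3) + n * PySem.Int.floordiv m 3

def f (n : Int) (m : Int) : Int := fRec (n.natAbs + m.natAbs) n m

-- ===== PORT B =====
def f_alt (n : Int) (m : Int) : Int := PySem.Int.floordiv (n * m + 2) 3

-- ===== PRECONDITION & SPEC =====
-- Pre_ restricts to the grid problem's natural domain n, m ≥ 0: on negative dimensions
-- A's min(n, m) base case returns meaningless negative counts that no caller would want.
def Pre_f (n : Int) (m : Int) : Prop := 0 ≤ n ∧ 0 ≤ m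
instance (n : Int) (m : Int) : Decidable (Pre_f n m) := by unfold Pre_f; infer_instance
def pvWitness_f : Int × Int := (5, 7)
def Spec_f (n : Int) (m : Int) (out : Int) : Prop := out = f_alt n m
instance (n : Int) (m : Int) (out : Int) : Decidable (Spec_f n m out) := by unfold Spec_f; infer_instance

-- ===== CLAIM (what is proved, stated in full; the proofs are below) =====
def Claim_equal_f : Prop := ∀ (n : Int) (m : Int), Dom_f n m → Pre_f n m → Spec_f n m (f n m)

-- ===== LEMMAS AND PROOFS =====

theorem fRec_eq (fuel : Nat) (n m : Int) (hn : 0 ≤ n) (hm : 0 ≤ m)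
    (hfuel : n.natAbs + m.natAbs ≤ fuel) : fRec fuel n m = f_alt n m := by
  induction fuel generalizing n m with
  | zero =>
      have h3 : (0:Int) < 3 := by norm_num
      rw [fRec]
      have hb : n ≤ 3 ∧ m ≤ 3 := by omega
      rw [if_pos hb]
      simp only [f_alt, PySem.Int.floordiv_eq_ediv_of_pos h3]
      have hn0 : n = 0 := by omega
      have hm0 : m = 0 := by omega
      subst hn0; subst hm0; decide
  | succ fuel ih =>
      have h3 : (0:Int) < 3 := by norm_num
      rw [fRec]
      by_cases hb : n ≤ 3 ∧ m ≤ 3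
      · rw [if_pos hb]
        obtain ⟨h1, h2⟩ := hb
        simp only [f_alt, PySem.Int.floordiv_eq_ediv_of_pos h3]
        interval_cases n <;> interval_cases m <;> decide
      · rw [if_neg hb]
        by_cases hgt : n > m
        · rw [if_pos hgt]
          have hmod := PySem.Int.mod_eq_emod_of_pos (a := n) h3
          have hdiv := PySem.Int.floordiv_eq_ediv_of_pos (a := n) h3
          rw [hmod, hdiv,
            ih (n % 3) m (by omega) hm (by omega)]
          simp only [f_alt, PySem.Int.floordiv_eq_ediv_of_pos h3]
          have hnm : n * m + 2 = (n % 3) * m + 2 + m * (n / 3) * 3 := by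
            have := Int.mul_ediv_add_emod n 3
            nlinarith [this]
          rw [hnm, Int.add_mul_ediv_right _ _ (by norm_num : (3:Int) ≠ 0)]
        · rw [if_neg hgt]
          have hmod := PySem.Int.mod_eq_emod_of_pos (a := m) h3
          have hdiv := PySem.Int.floordiv_eq_ediv_of_pos (a := m) h3
          rw [hmod, hdiv,
            ih n (m % 3) hn (by omega) (by omega)]
          simp only [f_alt, PySem.Int.floordiv_eq_ediv_of_pos h3]
          have hnm : n * m + 2 = n * (m % 3) + 2 + n * (m / 3) * 3 := by
            have := Int.mul_ediv_add_emod m 3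
            nlinarith [this]
          rw [hnm, Int.add_mul_ediv_right _ _ (by norm_num : (3:Int) ≠ 0)]

-- ===== VERDICT (by name: the statement is the Claim_ definition above) =====
theorem f_spec : Claim_equal_f := by
  intro n m _ hpre
  exact fRec_eq (n.natAbs + m.natAbs) n m hpre.1 hpre.2 le_rfl
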